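-- pv_equiv track=rewrite | github.com/minwookkim115/Algorithm | 프로그래머스/1/140108. 문자열 나누기/문자열 나누기.py | solution
-- ===== SOURCE A (Python) =====
-- def solution(s):
--     answer = 0
--
--     count = 0
--     temp_c = 0
--     temp_s = ''
--
--     for i in range(len(s)):
--         if count == temp_c:
--             temp_s = s[i]
--             answer += 1
--             count = 0
--             temp_c = 0
--
--         if temp_s != s[i]:
--             temp_c += 1
--         else:
--             count += 1
--
--     return answer
-- ===== SOURCE B (Python) =====
-- def solution(s):
--     answer = 0
--     while s:
--         ref, s = s[0], s[1:]
--         same, diff = 1, 0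
--         while s and same != diff:
--             if s[0] == ref:
--                 same += 1
--             else:
--                 diff += 1
--             s = s[1:]
--         answer += 1
--     return answer
-- ===== Notes on version B (the rewrite author's own statement) =====
-- stated objective: alternative
-- what changed: A's single pass carrying four pieces of loop state (answer, same/diff counters and the remembered reference char) is replaced by an outer loop that repeatedly slices one balanced segment off the front of the string, counting one segment per iteration.
import Mathlib
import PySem

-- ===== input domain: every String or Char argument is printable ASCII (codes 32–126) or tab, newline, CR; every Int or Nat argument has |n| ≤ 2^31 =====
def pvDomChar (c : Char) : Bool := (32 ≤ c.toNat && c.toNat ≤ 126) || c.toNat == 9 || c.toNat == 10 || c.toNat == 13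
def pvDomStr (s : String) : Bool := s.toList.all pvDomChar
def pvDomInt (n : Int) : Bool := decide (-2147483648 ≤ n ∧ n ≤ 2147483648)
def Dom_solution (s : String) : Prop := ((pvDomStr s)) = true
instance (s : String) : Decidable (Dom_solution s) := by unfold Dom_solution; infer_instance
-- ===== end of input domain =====

-- B replaces A's single pass with four running counters by an outer loop that slices off
-- one balanced segment per iteration (objective: alternative decomposition, not faster).

-- ===== PORT A =====
-- A's one-char strings temp_s / s[i] are represented as List Char ([] = Python '');
-- the for-loop over range(len(s)) becomes structural recursion over s.toList.
def solutionLoop : List Char → Int → Int → Int → List Char → Int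
  | [], answer, _, _, _ => answer
  | c :: rest, answer, count, temp_c, temp_s =>
    -- if count == temp_c: temp_s = s[i]; answer += 1; count = 0; temp_c = 0
    let st := if count = temp_c then (answer + 1, (0 : Int), (0 : Int), [c])
              else (answer, count, temp_c, temp_s)
    -- if temp_s != s[i]: temp_c += 1 else: count += 1
    if st.2.2.2 ≠ [c] then solutionLoop rest st.1 st.2.1 (st.2.2.1 + 1) st.2.2.2
    else solutionLoop rest st.1 (st.2.1 + 1) st.2.2.1 st.2.2.2

def solution (s : String) : Int := solutionLoop s.toList 0 0 0 []

-- ===== PORT B =====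
-- inner while loop: 'while s and same != diff: …; s = s[1:]' — returns the remaining list
def segRest (ref : Char) : Int → Int → List Char → List Char
  | _, _, [] => []
  | same, diff, c :: r =>
    if same ≠ diff then
      (if c = ref then segRest ref (same + 1) diff r else segRest ref same (diff + 1) r)
    else c :: r

theorem segRest_length_le (ref : Char) : ∀ (same diff : Int) (l : List Char),
    (segRest ref same diff l).length ≤ l.length := by
  intro same diff l
  induction l generalizing same diff with
  | nil => simp [segRest]
  | cons c r ih =>
    simp only [segRest]
    split
    · split
      · exact le_trans (ih _ _) (Nat.le_succ _)
      · exact le_trans (ih _ _) (Nat.le_succ _)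
    · exact le_refl _

-- outer while loop: 'while s: ref, s = s[0], s[1:]; …; answer += 1'
def altLoop : List Char → Int → Int
  | [], answer => answer
  | c :: r, answer => altLoop (segRest c 1 0 r) (answer + 1)
  termination_by l _ => l.length
  decreasing_by
    exact Nat.lt_succ_of_le (segRest_length_le _ _ _ _)

def solution_alt (s : String) : Int := altLoop s.toList 0

-- ===== PRECONDITION & SPEC =====
def Spec_solution (s : String) (out : Int) : Prop := out = solution_alt s
instance (s : String) (out : Int) : Decidable (Spec_solution s out) := by unfold Spec_solution; infer_instance

-- ===== CLAIM (what is proved, stated in full; the proofs are below) =====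
def Claim_equal_solution : Prop := ∀ (s : String), Dom_solution s → Spec_solution s (solution s)

-- ===== LEMMAS AND PROOFS =====

theorem segRest_bal (ref : Char) (k : Int) (l : List Char) : segRest ref k k l = l := by
  cases l <;> simp [segRest]

-- Simultaneous invariant, by strong induction on the list length:
-- (inner) inside a segment with reference char c and unbalanced counts, A's loop equals
--         B's outer loop run on the rest of the current segment;
-- (boundary) at a segment boundary (count = temp_c), A's loop equals B's outer loop.
theorem loops_agree : ∀ (n : ℕ) (l : List Char), l.length = n →
    ((∀ (a count temp_c : Int) (c : Char), count ≠ temp_c →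
        solutionLoop l a count temp_c [c] = altLoop (segRest c count temp_c l) a) ∧
     (∀ (a k : Int) (ts : List Char), solutionLoop l a k k ts = altLoop l a)) := by
  intro n
  induction n using Nat.strong_induction_on with
  | _ n ih =>
    intro l hl
    constructor
    · intro a count temp_c c hne
      match l with
      | [] => simp [solutionLoop, segRest, altLoop]
      | d :: r =>
        have hr : r.length < n := by simp [← hl]
        by_cases hdc : d = c
        · subst hdc
          rw [show segRest d count temp_c (d :: r) = segRest d (count + 1) temp_c r from by
                simp [segRest, hne],
              show solutionLoop (d :: r) a count temp_c [d]
                  = solutionLoop r a (count + 1) temp_c [d] from by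
                simp [solutionLoop, hne]]
          by_cases hb : count + 1 = temp_c
          · rw [hb, segRest_bal]
            exact (ih _ hr r rfl).2 a temp_c [d]
          · exact (ih _ hr r rfl).1 a (count + 1) temp_c d hb
        · rw [show segRest c count temp_c (d :: r) = segRest c count (temp_c + 1) r from by
                simp [segRest, hne, hdc],
              show solutionLoop (d :: r) a count temp_c [c]
                  = solutionLoop r a count (temp_c + 1) [c] from by
                simp [solutionLoop, hne, Ne.symm hdc]]
          by_cases hb : count = temp_c + 1
          · rw [hb, segRest_bal]
            exact (ih _ hr r rfl).2 a (temp_c + 1) [c]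
          · exact (ih _ hr r rfl).1 a count (temp_c + 1) c hb
    · intro a k ts
      match l with
      | [] => simp [solutionLoop, altLoop]
      | d :: r =>
        have hr : r.length < n := by simp [← hl]
        simp only [solutionLoop, altLoop]
        rw [if_neg (by simp)]
        exact (ih _ hr r rfl).1 (a + 1) 1 0 d (by norm_num)

-- ===== VERDICT (by name: the statement is the Claim_ definition above) =====
theorem solution_spec : Claim_equal_solution := by
  intro s _
  unfold Spec_solution solution solution_alt
  exact (loops_agree s.toList.length s.toList rfl).2 0 0 []
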